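-- pv_equiv track=rewrite | github.com/Seb-Maraszek/Compiler | helpers/generator.py | generateNumberInRegister
-- ===== SOURCE A (Python) =====
-- def generateNumberInRegister(number, register):
--     commands = ""
--
--     while number != 0:
--         if number % 2 == 0:
--             number = number // 2
--             commands = "SHL {}\n".format(register) + commands
--         else:
--             number = number - 1
--             commands = "INC {}\n".format(register) + commands
--     commands = "RESET {} \n".format(register) + commands
--     return commands
-- ===== SOURCE B (Python) =====
-- def generateNumberInRegister(number, register):
--     parts = ["RESET {} \n".format(register)]
--     if number != 0:
--         bits = bin(number)[2:]
--         parts.append("INC {}\n".format(register))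
--         for b in bits[1:]:
--             parts.append("SHL {}\n".format(register))
--             if b == '1':
--                 parts.append("INC {}\n".format(register))
--     return "".join(parts)
-- ===== Notes on version B (the rewrite author's own statement) =====
-- stated objective: alternative
-- what changed: B replaces A's LSB-to-MSB halving loop that prepends each command to the front of the string with a single MSB-to-LSB pass over the binary digit string bin(number)[2:], appending RESET, one leading INC, then SHL (+INC for 1-bits) to a list joined once.
import Mathlib
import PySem

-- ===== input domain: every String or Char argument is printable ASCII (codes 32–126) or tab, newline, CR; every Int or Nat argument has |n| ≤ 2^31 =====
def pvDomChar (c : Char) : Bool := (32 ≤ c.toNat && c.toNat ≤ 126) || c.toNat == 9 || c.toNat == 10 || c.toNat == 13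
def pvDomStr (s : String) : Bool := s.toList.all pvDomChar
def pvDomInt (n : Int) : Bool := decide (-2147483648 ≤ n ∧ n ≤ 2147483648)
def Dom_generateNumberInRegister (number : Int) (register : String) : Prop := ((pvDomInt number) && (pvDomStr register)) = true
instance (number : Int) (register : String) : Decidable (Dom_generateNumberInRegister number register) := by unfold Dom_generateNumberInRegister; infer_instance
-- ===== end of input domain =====

-- B builds the command list MSB→LSB from the binary digit string and joins once,
-- instead of A's LSB→MSB halving loop that prepends to the result string (alternative decomposition).

-- ===== PORT A =====
-- A's while-loop; the `number ≤ 0` guard only totalizes the recursion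
-- (the Python loops forever for negative number; Pre_ excludes those inputs).
def genAloop (number : Int) (register : String) (commands : String) : String :=
  if _h : number ≤ 0 then commands
  else if PySem.Int.mod number 2 = 0 then
    genAloop (PySem.Int.floordiv number 2) register (("SHL " ++ register ++ "\n") ++ commands)
  else
    genAloop (number - 1) register (("INC " ++ register ++ "\n") ++ commands)
termination_by number.toNat
decreasing_by
  · have h2 : PySem.Int.floordiv number 2 = number / 2 :=
      PySem.Int.floordiv_eq_ediv_of_pos (by omega)
    rw [h2]; omega
  · omega

def generateNumberInRegister (number : Int) (register : String) : String :=
  ("RESET " ++ register ++ " \n") ++ genAloop number register ""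

-- ===== PORT B =====
-- bin(n)[2:] as a list of '0'/'1' chars (MSB first); [] for n = 0
def pvBinDigits (n : Nat) : List Char :=
  if _h : n = 0 then []
  else pvBinDigits (n / 2) ++ [if n % 2 = 1 then '1' else '0']
termination_by n
decreasing_by omega

def generateNumberInRegister_alt (number : Int) (register : String) : String :=
  let reset := "RESET " ++ register ++ " \n"
  if number = 0 then reset
  else
    match pvBinDigits number.toNat with
    | [] => reset  -- unreachable for number > 0 (negative numbers lie outside Pre_)
    | _ :: rest =>
      rest.foldl
        (fun acc b =>
          acc ++ ("SHL " ++ register ++ "\n") ++ (if b = '1' then "INC " ++ register ++ "\n" else ""))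
        (reset ++ ("INC " ++ register ++ "\n"))

-- ===== PRECONDITION & SPEC =====
-- Pre_ excludes negative numbers, on which the Python A never returns (infinite loop).
def Pre_generateNumberInRegister (number : Int) (register : String) : Prop := 0 ≤ number
instance (number : Int) (register : String) : Decidable (Pre_generateNumberInRegister number register) := by
  unfold Pre_generateNumberInRegister; infer_instance
def pvWitness_generateNumberInRegister : Int × String := (6, "a")

def Spec_generateNumberInRegister (number : Int) (register : String) (out : String) : Prop := out = generateNumberInRegister_alt number register
instance (number : Int) (register : String) (out : String) : Decidable (Spec_generateNumberInRegister number register out) := by unfold Spec_generateNumberInRegister; infer_instance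

-- ===== CLAIM (what is proved, stated in full; the proofs are below) =====
def Claim_equal_generateNumberInRegister : Prop := ∀ (number : Int) (register : String), Dom_generateNumberInRegister number register → Pre_generateNumberInRegister number register → Spec_generateNumberInRegister number register (generateNumberInRegister number register)

-- ===== LEMMAS AND PROOFS =====

-- B's fold with the step function abstracted, for reasoning
def emitF (register : String) (bs : List Char) (acc : String) : String :=
  bs.foldl
    (fun acc b =>
      acc ++ ("SHL " ++ register ++ "\n") ++ (if b = '1' then "INC " ++ register ++ "\n" else ""))
    acc

theorem emitF_nil (r a : String) : emitF r [] a = a := rfl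

theorem foldl_str_acc (g : Char → String) : ∀ (bs : List Char) (a : String),
    bs.foldl (fun acc b => acc ++ g b) a = a ++ bs.foldl (fun acc b => acc ++ g b) "" := by
  intro bs
  induction bs with
  | nil => simp
  | cons b t ih =>
    intro a
    simp only [List.foldl_cons]
    rw [ih (a ++ g b), ih ("" ++ g b)]
    simp [String.append_assoc]

theorem emitF_acc (r : String) (bs : List Char) (a : String) :
    emitF r bs a = a ++ emitF r bs "" := by
  have hf : (fun (acc : String) (b : Char) =>
        acc ++ ("SHL " ++ r ++ "\n") ++ (if b = '1' then "INC " ++ r ++ "\n" else "")) =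
      (fun (acc : String) (b : Char) =>
        acc ++ (("SHL " ++ r ++ "\n") ++ (if b = '1' then "INC " ++ r ++ "\n" else ""))) := by
    funext acc b; rw [String.append_assoc]
  unfold emitF
  rw [hf]
  exact foldl_str_acc _ bs a

theorem pvBinDigits_zero : pvBinDigits 0 = [] := by rw [pvBinDigits]; simp

theorem emitF_snoc (r : String) (bs : List Char) (b : Char) (a : String) :
    emitF r (bs ++ [b]) a =
      emitF r bs a ++ ("SHL " ++ r ++ "\n") ++ (if b = '1' then "INC " ++ r ++ "\n" else "") := by
  simp [emitF]

theorem pvBinDigits_ne_nil (n : Nat) (h : 1 ≤ n) : pvBinDigits n ≠ [] := by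
  rw [pvBinDigits]
  simp [Nat.ne_of_gt h]

theorem tail_append_singleton {α : Type} (xs : List α) (b : α) (h : xs ≠ []) :
    (xs ++ [b]).tail = xs.tail ++ [b] := by
  cases xs with
  | nil => exact absurd rfl h
  | cons x t => simp

theorem genAloop_eq (r : String) : ∀ (n : Nat), 1 ≤ n → ∀ cmds : String,
    genAloop (n : Int) r cmds =
      ("INC " ++ r ++ "\n") ++ emitF r (pvBinDigits n).tail "" ++ cmds := by
  intro n
  induction n using Nat.strong_induction_on with
  | _ n ih =>
    intro hn cmds
    rw [genAloop]
    have hneg : ¬ ((n : Int) ≤ 0) := by omega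
    rw [dif_neg hneg]
    have hmod : PySem.Int.mod (n : Int) 2 = ((n % 2 : Nat) : Int) := by
      exact_mod_cast PySem.Int.mod_natCast n 2
    have hdiv : PySem.Int.floordiv (n : Int) 2 = ((n / 2 : Nat) : Int) := by
      exact_mod_cast PySem.Int.floordiv_natCast n 2
    by_cases hpar : n % 2 = 0
    · -- even, so n ≥ 2
      have h2 : 2 ≤ n := by omega
      rw [if_pos (by rw [hmod, hpar]; rfl), hdiv,
        ih (n / 2) (by omega) (by omega) (("SHL " ++ r ++ "\n") ++ cmds)]
      have hbd : pvBinDigits n = pvBinDigits (n / 2) ++ ['0'] := by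
        rw [pvBinDigits]
        simp [Nat.ne_of_gt (by omega : 0 < n), hpar]
      rw [hbd, tail_append_singleton _ _ (pvBinDigits_ne_nil _ (by omega)), emitF_snoc]
      simp [String.append_assoc]
    · -- odd
      have hpar1 : n % 2 = 1 := by omega
      rw [if_neg (by rw [hmod, hpar1]; decide)]
      rcases Nat.eq_or_lt_of_le hn with h1 | h3
      · -- n = 1
        subst h1
        have h10 : ((1 : Nat) : Int) - 1 = ((0 : Nat) : Int) := by norm_num
        rw [h10, genAloop, dif_pos (by norm_num : ((0 : Nat) : Int) ≤ 0)]
        have hbd : pvBinDigits 1 = [] ++ ['1'] := by rw [pvBinDigits]; simp [pvBinDigits_zero]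
        rw [hbd]
        simp [emitF_nil]
      · -- n ≥ 2, odd hence n ≥ 3, n - 1 even ≥ 2
        have hcast : (n : Int) - 1 = ((n - 1 : Nat) : Int) := by omega
        rw [hcast, ih (n - 1) (by omega) (by omega) (("INC " ++ r ++ "\n") ++ cmds)]
        have hbd : pvBinDigits n = pvBinDigits (n / 2) ++ ['1'] := by
          rw [pvBinDigits]
          simp [Nat.ne_of_gt (by omega : 0 < n), hpar1]
        have hbd' : pvBinDigits (n - 1) = pvBinDigits (n / 2) ++ ['0'] := by
          rw [pvBinDigits]
          have he : (n - 1) % 2 = 0 := by omega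
          have hd : (n - 1) / 2 = n / 2 := by omega
          simp [Nat.ne_of_gt (by omega : 0 < n - 1), he, hd]
        have hne : pvBinDigits (n / 2) ≠ [] := pvBinDigits_ne_nil _ (by omega)
        rw [hbd, hbd', tail_append_singleton _ _ hne, tail_append_singleton _ _ hne,
          emitF_snoc, emitF_snoc]
        simp [String.append_assoc]

-- ===== VERDICT (by name: the statement is the Claim_ definition above) =====
theorem generateNumberInRegister_spec : Claim_equal_generateNumberInRegister := by
  intro number register _hdom hpre
  unfold Spec_generateNumberInRegister generateNumberInRegister generateNumberInRegister_alt
  by_cases h0 : number = 0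
  · subst h0
    rw [genAloop]
    simp
  · have hpos : 0 < number := lt_of_le_of_ne hpre (Ne.symm h0)
    have hcast : number = ((number.toNat : Nat) : Int) := by omega
    rw [if_neg h0, hcast, genAloop_eq register number.toNat (by omega) ""]
    simp only [Int.toNat_natCast]
    have hne := pvBinDigits_ne_nil number.toNat (by omega)
    cases hbd : pvBinDigits number.toNat with
    | nil => exact absurd hbd hne
    | cons b rest =>
      show _ = emitF register rest _
      conv_rhs => rw [emitF_acc]
      simp [String.append_assoc]
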